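-- pv_equiv track=rewrite | github.com/enricotomasi/GeeksforGeeks_problems | Easy/Cross the Bridge.py | findDays
-- ===== SOURCE A (Python) =====
-- def findDays (S):
--     # code here
--     ans = 0
--     jump = 0
--     planks = 0
--
--     for c in S:
--         if c == ".":
--             planks += 1
--         else:
--             if planks > jump:
--                 ans += 1
--                 jump = planks
--             planks = 0
--
--     if planks > jump:
--         ans += 1
--
--     return ans
-- ===== SOURCE B (Python) =====
-- def findDays(S):
--     # two-phase: build the table of '.'-run lengths (via join/split), then count running-max records
--     runs = [len(seg) for seg in "".join(c if c == "." else " " for c in S).split()]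
--     ans = best = 0
--     for r in runs:
--         if r > best:
--             ans, best = ans + 1, r
--     return ans
-- ===== Notes on version B (the rewrite author's own statement) =====
-- stated objective: idiomatic
-- what changed: Replaces A's single interleaved char-scan with three-state bookkeeping by a two-phase decomposition: extract the table of maximal dot-run lengths via join/split, then count strict running-max records over that list.
import Mathlib
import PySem

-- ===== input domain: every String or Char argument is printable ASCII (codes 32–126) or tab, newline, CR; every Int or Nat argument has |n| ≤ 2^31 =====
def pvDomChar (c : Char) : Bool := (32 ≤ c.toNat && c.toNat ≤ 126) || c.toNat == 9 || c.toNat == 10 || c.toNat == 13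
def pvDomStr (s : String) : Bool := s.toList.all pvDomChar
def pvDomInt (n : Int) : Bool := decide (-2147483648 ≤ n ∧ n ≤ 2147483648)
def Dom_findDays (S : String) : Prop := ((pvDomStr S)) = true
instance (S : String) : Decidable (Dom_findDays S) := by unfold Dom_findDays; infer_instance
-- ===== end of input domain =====

-- B replaces A's interleaved single char-scan by a two-phase decomposition (extract the table of
-- maximal dot-run lengths via join/split, then count strict running-max records); objective: idiomatic.

-- ===== PORT A =====
-- the body of A's for-loop over the state (ans, jump, planks)
def stepA (st : Int × Int × Int) (c : Char) : Int × Int × Int :=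
  if c = '.' then (st.1, st.2.1, st.2.2 + 1)
  else if st.2.2 > st.2.1 then (st.1 + 1, st.2.2, 0)
  else (st.1, st.2.1, 0)

def findDays (S : String) : Int :=
  let st := S.toList.foldl stepA (0, 0, 0)
  if st.2.2 > st.2.1 then st.1 + 1 else st.1

-- ===== PORT B =====
-- the body of B's for-loop over (ans, best), per run length r
def stepB (st : Int × Int) (r : Int) : Int × Int :=
  if r > st.2 then (st.1 + 1, r) else st

def findDays_alt (S : String) : Int :=
  let t := PySem.Str.join "" (S.toList.map (fun c => String.ofList [if c = '.' then c else ' ']))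
  let runs := (PySem.Str.split₀ t).map PySem.Str.len
  (runs.foldl stepB (0, 0)).1

-- ===== PRECONDITION & SPEC =====
def Spec_findDays (S : String) (out : Int) : Prop := out = findDays_alt S
instance (S : String) (out : Int) : Decidable (Spec_findDays S out) := by unfold Spec_findDays; infer_instance

-- ===== CLAIM (what is proved, stated in full; the proofs are below) =====
def Claim_equal_findDays : Prop := ∀ (S : String), Dom_findDays S → Spec_findDays S (findDays S)

-- ===== LEMMAS AND PROOFS =====

-- the character translation B applies before splitting
def pvTr (c : Char) : Char := if c = '.' then c else ' '

-- A's final fix-up after the loop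
def pvFin (st : Int × Int × Int) : Int := if st.2.2 > st.2.1 then st.1 + 1 else st.1

theorem isspace_tr (c : Char) :
    PySem.Chars.isspace (pvTr c) = !(decide (c = '.')) := by
  by_cases h : c = '.' <;> simp [pvTr, h] <;> decide

theorem go_acc (cs : List Char) : ∀ (cur : List Char) (acc : List (List Char)),
    PySem.Chars.split₀.go cs cur acc = acc.reverse ++ PySem.Chars.split₀.go cs cur [] := by
  induction cs with
  | nil =>
    intro cur acc
    by_cases h : cur.isEmpty <;> simp [PySem.Chars.split₀.go, h]
  | cons c rest ih =>
    intro cur acc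
    by_cases hs : PySem.Chars.isspace c
    · by_cases he : cur.isEmpty
      · simp only [PySem.Chars.split₀.go, hs, he, if_true]
        exact ih [] acc
      · simp only [PySem.Chars.split₀.go, hs, he, if_true, if_false, Bool.false_eq_true]
        rw [ih [] (cur.reverse :: acc), ih [] [cur.reverse]]
        simp
    · simp only [PySem.Chars.split₀.go, hs, Bool.false_eq_true, if_false]
      exact ih (c :: cur) acc

theorem main_lemma (cs : List Char) : ∀ (ans jump : Int) (cur : List Char), 0 ≤ jump →
    pvFin (cs.foldl stepA (ans, jump, (cur.length : Int)))
      = (((PySem.Chars.split₀.go (cs.map pvTr) cur []).map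
            (fun w => (w.length : Int))).foldl stepB (ans, jump)).1 := by
  induction cs with
  | nil =>
    intro ans jump cur hj
    cases cur with
    | nil =>
      simp [PySem.Chars.split₀.go, pvFin]
      omega
    | cons x xs =>
      simp [PySem.Chars.split₀.go, pvFin, stepB, apply_ite Prod.fst]
  | cons c rest ih =>
    intro ans jump cur hj
    by_cases hc : c = '.'
    · have : PySem.Chars.isspace (pvTr c) = false := by simp [isspace_tr, hc]
      simp only [List.map_cons, List.foldl_cons, PySem.Chars.split₀.go, this,
        Bool.false_eq_true, if_false]
      have h1 : stepA (ans, jump, (cur.length : Int)) c = (ans, jump, ((('.' :: cur).length : Nat) : Int)) := by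
        simp [stepA, hc]
      rw [h1]
      have h2 : pvTr c :: cur = '.' :: cur := by simp [pvTr, hc]
      rw [h2]
      exact ih ans jump ('.' :: cur) hj
    · have hs : PySem.Chars.isspace (pvTr c) = true := by simp [isspace_tr, hc]
      cases cur with
      | nil =>
        simp only [List.map_cons, List.foldl_cons, PySem.Chars.split₀.go, hs, if_true,
          List.isEmpty_nil]
        have h1 : stepA (ans, jump, ((([] : List Char).length : Nat) : Int)) c = (ans, jump, ((([] : List Char).length : Nat) : Int)) := by
          simp [stepA, hc]; omega
        rw [h1]
        exact ih ans jump [] hj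
      | cons x xs =>
        simp only [List.map_cons, List.foldl_cons, PySem.Chars.split₀.go, hs, if_true,
          List.isEmpty_cons, Bool.false_eq_true, if_false]
        rw [go_acc _ [] [(x :: xs).reverse]]
        simp only [List.reverse_cons, List.reverse_nil, List.nil_append, List.singleton_append,
          List.map_cons, List.foldl_cons]
        have hlen2 : (((xs.reverse ++ [x]).length : Nat) : Int) = ((x :: xs).length : Int) := by
          simp
        rw [hlen2]
        by_cases hgt : ((x :: xs).length : Int) > jump
        · rw [show stepA (ans, jump, ((x :: xs).length : Int)) c
              = (ans + 1, ((x :: xs).length : Int), (0 : Int)) from by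
            simp only [stepA, hc, if_false]; rw [if_pos hgt]]
          rw [show stepB (ans, jump) ((x :: xs).length : Int) = (ans + 1, ((x :: xs).length : Int)) from by
            simp only [stepB]; rw [if_pos hgt]]
          simpa using ih (ans + 1) ((x :: xs).length : Int) [] (by positivity)
        · rw [show stepA (ans, jump, ((x :: xs).length : Int)) c = (ans, jump, (0 : Int)) from by
            simp only [stepA, hc, if_false]; rw [if_neg hgt]]
          rw [show stepB (ans, jump) ((x :: xs).length : Int) = (ans, jump) from by
            simp only [stepB]; rw [if_neg hgt]]
          simpa using ih ans jump [] hj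

theorem runs_eq (S : String) :
    (PySem.Str.split₀ (PySem.Str.join ""
        (S.toList.map (fun c => String.ofList [if c = '.' then c else ' '])))).map PySem.Str.len
      = (PySem.Chars.split₀.go (S.toList.map pvTr) [] []).map (fun w => (w.length : Int)) := by
  have ht : (PySem.Str.join "" (S.toList.map (fun c => String.ofList [if c = '.' then c else ' ']))).toList
      = S.toList.map pvTr := by
    rw [PySem.Str.toList_join]
    have h1 : (String.toList ∘ fun c => String.ofList [if c = '.' then c else ' ']) = fun c => [pvTr c] := by
      funext c; simp [pvTr]
    simp only [List.map_map, h1]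
    have h2 : (fun c => [pvTr c]) = (fun c => [c]) ∘ pvTr := rfl
    rw [h2, ← List.map_map]
    have h3 : ("" : String).toList = [] := rfl
    rw [h3]
    exact PySem.Chars.join_nil_singletons _
  simp only [PySem.Str.split₀, ht, PySem.Chars.split₀, List.map_map]
  congr 1
  funext w
  simp [PySem.Str.len]

-- ===== VERDICT (by name: the statement is the Claim_ definition above) =====
theorem findDays_spec : Claim_equal_findDays := by
  intro S _
  show findDays S = findDays_alt S
  simp only [findDays, findDays_alt]
  rw [runs_eq S]
  have := main_lemma S.toList 0 0 [] (le_refl 0)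
  simpa [pvFin] using this
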